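-- pv_equiv track=rewrite | github.com/SD-droid-ux/Calculadora-de-Probabilidades | app.py | calcular_soma_condicional
-- ===== SOURCE A (Python) =====
-- def calcular_soma_condicional(numeros):
--     resultados = []
--     soma = 0
--     anterior = None
--     for n in numeros:
--         if anterior is None or (n > 0 and anterior <= 0) or (n < 0 and anterior >= 0) or n != anterior:
--             soma = n
--         else:
--             soma += n
--         resultados.append(soma)
--         anterior = n
--     return resultados
-- ===== SOURCE B (Python) =====
-- def calcular_soma_condicional(numeros):
--     resultados = []
--     i = 0
--     N = len(numeros)
--     while i < N:
--         v = numeros[i]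
--         s = 0
--         while i < N and numeros[i] == v:
--             s += v
--             resultados.append(s)
--             i += 1
--     return resultados
-- ===== Notes on version B (the rewrite author's own statement) =====
-- stated objective: alternative
-- what changed: Replaces A's element-by-element state machine (soma/anterior with a four-way reset condition) by an outer loop over maximal runs of equal consecutive values with an inner per-run accumulation, exploiting that A's sum only continues when the value repeats.
import Mathlib
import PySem

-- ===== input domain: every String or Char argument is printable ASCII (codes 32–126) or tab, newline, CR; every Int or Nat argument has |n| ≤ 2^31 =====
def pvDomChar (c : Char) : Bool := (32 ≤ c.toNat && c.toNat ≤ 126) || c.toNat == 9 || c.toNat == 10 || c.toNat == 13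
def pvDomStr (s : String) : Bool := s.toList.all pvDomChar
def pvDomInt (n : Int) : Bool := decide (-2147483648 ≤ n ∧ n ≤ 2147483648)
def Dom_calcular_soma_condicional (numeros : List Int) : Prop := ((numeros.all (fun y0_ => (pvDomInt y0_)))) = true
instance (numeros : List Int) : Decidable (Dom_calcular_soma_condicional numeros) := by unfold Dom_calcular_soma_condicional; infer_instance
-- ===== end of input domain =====

-- B replaces A's soma/anterior state machine by an outer loop over maximal runs of
-- equal consecutive values with an inner per-run accumulation (alternative decomposition).

-- ===== PORT A =====
-- A's single for-loop with state (soma, anterior); resultados is produced element by element.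
def pvLoopA (numeros : List Int) (soma : Int) (anterior : Option Int) : List Int :=
  match numeros with
  | [] => []
  | n :: rest =>
    let soma' : Int :=
      match anterior with
      | none => n
      | some a => if (n > 0 ∧ a ≤ 0) ∨ (n < 0 ∧ a ≥ 0) ∨ n ≠ a then n else soma + n
    soma' :: pvLoopA rest soma' (some n)

def calcular_soma_condicional (numeros : List Int) : List Int :=
  pvLoopA numeros 0 none

-- ===== PORT B =====
-- inner while of B: walks the run's elements, appending the running sum s += v
def pvRunAcc (v s : Int) (run : List Int) : List Int :=
  match run with
  | [] => []
  | _ :: ys => (s + v) :: pvRunAcc v (s + v) ys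

-- outer while of B: peel off one maximal run of elements equal to the run head, recurse on the rest
def calcular_soma_condicional_alt (numeros : List Int) : List Int :=
  match numeros with
  | [] => []
  | x :: xs =>
    pvRunAcc x 0 (x :: xs.takeWhile (· = x)) ++
      calcular_soma_condicional_alt (xs.dropWhile (· = x))
termination_by numeros.length
decreasing_by
  simp only [List.length_cons]
  exact Nat.lt_succ_of_le (List.length_dropWhile_le _ _)

-- ===== PRECONDITION & SPEC =====
def Spec_calcular_soma_condicional (numeros : List Int) (out : List Int) : Prop := out = calcular_soma_condicional_alt numeros
instance (numeros : List Int) (out : List Int) : Decidable (Spec_calcular_soma_condicional numeros out) := by unfold Spec_calcular_soma_condicional; infer_instance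

-- ===== CLAIM (what is proved, stated in full; the proofs are below) =====
def Claim_equal_calcular_soma_condicional : Prop := ∀ (numeros : List Int), Dom_calcular_soma_condicional numeros → Spec_calcular_soma_condicional numeros (calcular_soma_condicional numeros)

-- ===== LEMMAS AND PROOFS =====

-- After the first element, A's loop on state (s, some v) processes exactly the maximal run
-- of elements equal to v as a running sum, then restarts as if from the initial state.
theorem pvLoopA_run (xs : List Int) : ∀ (s v : Int),
    pvLoopA xs s (some v) =
      pvRunAcc v s (xs.takeWhile (· = v)) ++ pvLoopA (xs.dropWhile (· = v)) 0 none := by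
  induction xs with
  | nil => intro s v; simp [pvLoopA, pvRunAcc]
  | cons y ys ih =>
    intro s v
    by_cases h : y = v
    · subst h
      simp only [List.takeWhile_cons, List.dropWhile_cons, decide_true, if_true]
      have hcond : ¬((y > 0 ∧ y ≤ 0) ∨ (y < 0 ∧ y ≥ 0) ∨ y ≠ y) := by
        rintro (⟨h1,h2⟩|⟨h1,h2⟩|h) <;> omega
      simp only [pvLoopA, hcond, if_false, pvRunAcc, List.cons_append]
      rw [ih (s + y) y]
    · have hy : ¬ (decide (y = v) = true) := by simp [h]
      simp only [List.takeWhile_cons, List.dropWhile_cons]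
      rw [if_neg hy, if_neg hy]
      have hcond : (y > 0 ∧ v ≤ 0) ∨ (y < 0 ∧ v ≥ 0) ∨ y ≠ v := Or.inr (Or.inr h)
      simp only [pvRunAcc, List.nil_append, pvLoopA]
      rw [if_pos hcond]

theorem pvMain (n : ℕ) : ∀ (xs : List Int), xs.length ≤ n →
    pvLoopA xs 0 none = calcular_soma_condicional_alt xs := by
  induction n with
  | zero =>
    intro xs hlen
    have : xs = [] := List.eq_nil_of_length_eq_zero (Nat.le_zero.mp hlen)
    subst this
    simp [pvLoopA, calcular_soma_condicional_alt]
  | succ n ih =>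
    intro xs hlen
    match xs with
    | [] => simp [pvLoopA, calcular_soma_condicional_alt]
    | x :: rest =>
      have h1 : pvLoopA (x :: rest) 0 none = x :: pvLoopA rest x (some x) := by
        simp [pvLoopA]
      rw [h1, pvLoopA_run rest x x]
      have hdw : (rest.dropWhile (· = x)).length ≤ n := by
        have := List.length_dropWhile_le (fun y => decide (y = x)) rest
        simp only [List.length_cons] at hlen
        omega
      rw [ih _ hdw]
      show _ = calcular_soma_condicional_alt (x :: rest)
      rw [calcular_soma_condicional_alt]
      simp [pvRunAcc]

-- ===== VERDICT (by name: the statement is the Claim_ definition above) =====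
theorem calcular_soma_condicional_spec : Claim_equal_calcular_soma_condicional := by
  intro numeros _
  unfold Spec_calcular_soma_condicional calcular_soma_condicional
  exact pvMain numeros.length numeros (le_refl _)
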